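-- pv_equiv track=rewrite | github.com/sauravaggarwalcfd/CCPL-ERP-V13-mongo- | backend/migrate_item_skus.py | generate_sku_code_from_name
-- ===== SOURCE A (Python) =====
-- def generate_sku_code_from_name(name: str, length: int = 4) -> str:
--     """Generate SKU code from a name by taking consonants first, then vowels"""
--     if not name:
--         return "0" * length
--
--     name = name.upper()
--     consonants = ''.join(c for c in name if c.isalpha() and c not in 'AEIOU')
--     vowels = ''.join(c for c in name if c.isalpha() and c in 'AEIOU')
--
--     code = consonants + vowels
--     code = code[:length] if len(code) >= length else code.ljust(length, '0')
--     return code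
-- ===== SOURCE B (Python) =====
-- def generate_sku_code_from_name(name: str, length: int = 4) -> str:
--     """Generate SKU code from a name by taking consonants first, then vowels"""
--     if not name:
--         return "0" * length
--     letters = [c for c in name.upper() if c.isalpha()]
--     code = ''.join(sorted(letters, key=lambda c: c in 'AEIOU'))
--     return code[:length] if len(code) >= length else code.ljust(length, '0')
-- ===== Notes on version B (the rewrite author's own statement) =====
-- stated objective: idiomatic
-- what changed: Replaces A's two sequential filter passes (consonants, then vowels) with one alphabetic-filter pass followed by a single stable sort on a boolean is-vowel key, which partitions consonants before vowels while preserving order.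
import Mathlib
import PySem

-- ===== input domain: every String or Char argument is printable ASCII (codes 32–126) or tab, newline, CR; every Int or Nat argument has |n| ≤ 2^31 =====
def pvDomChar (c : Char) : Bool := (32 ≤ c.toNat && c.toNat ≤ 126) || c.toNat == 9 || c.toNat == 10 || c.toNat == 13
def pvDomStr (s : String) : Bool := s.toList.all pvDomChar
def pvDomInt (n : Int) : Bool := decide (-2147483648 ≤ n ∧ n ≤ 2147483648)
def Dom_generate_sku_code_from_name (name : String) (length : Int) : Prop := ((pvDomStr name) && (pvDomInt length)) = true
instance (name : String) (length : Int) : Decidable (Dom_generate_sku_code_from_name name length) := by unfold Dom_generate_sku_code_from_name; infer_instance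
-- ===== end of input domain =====

-- B replaces A's two sequential filter passes with one alphabetic filter followed by a
-- stable sort on a boolean is-vowel key (idiomatic partition); same result, similar cost.


-- ===== PORT A =====
-- truncate-or-pad tail shared verbatim by both Python versions:
--   code[:length] if len(code) >= length else code.ljust(length, '0')
def pvTailA (code : List Char) (length : Int) : List Char :=
  if length ≤ (code.length : Int) then PySem.List.slice code none (some length)
  else code ++ List.replicate (length.toNat - code.length) '0'   -- ljust(length,'0'); here len(code) < length

def generate_sku_code_from_name (name : String) (length : Int) : String :=
  if name = "" then String.ofList (List.replicate length.toNat '0')  -- "0" * length ("" for length ≤ 0)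
  else
    let up := PySem.Chars.upper name.toList                          -- name = name.upper()
    let consonants := up.filter (fun c => PySem.Chars.isalpha c && !(['A','E','I','O','U'].contains c))
    let vowels := up.filter (fun c => PySem.Chars.isalpha c && ['A','E','I','O','U'].contains c)
    String.ofList (pvTailA (consonants ++ vowels) length)

-- ===== PORT B =====
def generate_sku_code_from_name_alt (name : String) (length : Int) : String :=
  if name = "" then String.ofList (List.replicate length.toNat '0')  -- "0" * length
  else
    let letters := (PySem.Chars.upper name.toList).filter PySem.Chars.isalpha
    let code := PySem.List.sorted letters (fun c => ['A','E','I','O','U'].contains c) false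
    String.ofList (pvTailA code length)

-- ===== PRECONDITION & SPEC =====
def Spec_generate_sku_code_from_name (name : String) (length : Int) (out : String) : Prop := out = generate_sku_code_from_name_alt name length
instance (name : String) (length : Int) (out : String) : Decidable (Spec_generate_sku_code_from_name name length out) := by unfold Spec_generate_sku_code_from_name; infer_instance

-- ===== CLAIM (what is proved, stated in full; the proofs are below) =====
def Claim_equal_generate_sku_code_from_name : Prop := ∀ (name : String) (length : Int), Dom_generate_sku_code_from_name name length → Spec_generate_sku_code_from_name name length (generate_sku_code_from_name name length)

-- ===== LEMMAS AND PROOFS =====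

-- Inserting x into a false-block ++ true-block state keeps the blocks: a false-key x lands
-- between the blocks, a true-key x at the very end.
theorem pv_insertBy_partition {α : Type} (p : α → Bool) (x : α) (fs ts : List α)
    (hf : ∀ c ∈ fs, p c = false) (ht : ∀ c ∈ ts, p c = true) :
    PySem.List.insertBy (fun a b => decide (p a < p b)) x (fs ++ ts) =
      if p x then fs ++ ts ++ [x] else fs ++ x :: ts := by
  by_cases hx : p x = true
  · rw [if_pos hx]
    apply PySem.List.insertBy_of_forall_not_before
    intro y hy
    simp only [hx, decide_eq_false_iff_not]
    exact fun h => absurd h (by simp)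
  · rw [if_neg hx]
    simp only [Bool.not_eq_true] at hx
    induction fs with
    | nil =>
      cases ts with
      | nil => rfl
      | cons t ts' =>
        simp only [List.nil_append]
        have : (decide (p x < p t)) = true := by
          rw [hx, ht t (by simp)]; decide
        simp [PySem.List.insertBy, this]
    | cons f fs' ih =>
      have hpf : p f = false := hf f (by simp)
      have : (decide (p x < p f)) = false := by rw [hx, hpf]; decide
      simp only [List.cons_append, PySem.List.insertBy, this, Bool.false_eq_true, if_false]
      rw [ih (fun c hc => hf c (by simp [hc]))]

-- Invariant of the insertion-sort fold with a boolean key.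
theorem pv_foldl_insertBy_bool {α : Type} (p : α → Bool) (xs : List α) :
    ∀ (fs ts : List α), (∀ c ∈ fs, p c = false) → (∀ c ∈ ts, p c = true) →
    xs.foldl (fun acc x => PySem.List.insertBy (fun a b => decide (p a < p b)) x acc) (fs ++ ts)
      = (fs ++ xs.filter (fun c => !p c)) ++ (ts ++ xs.filter p) := by
  induction xs with
  | nil => intro fs ts _ _; simp
  | cons x xs ih =>
    intro fs ts hf ht
    simp only [List.foldl_cons, pv_insertBy_partition p x fs ts hf ht]
    cases hx : p x with
    | true =>
      have ht' : ∀ c ∈ ts ++ [x], p c = true := by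
        intro c hc
        rcases List.mem_append.1 hc with h | h
        · exact ht c h
        · simp at h; simp [h, hx]
      rw [if_pos rfl, List.append_assoc fs ts [x], ih fs (ts ++ [x]) hf ht']
      simp [hx]
    | false =>
      have hf' : ∀ c ∈ fs ++ [x], p c = false := by
        intro c hc
        rcases List.mem_append.1 hc with h | h
        · exact hf c h
        · simp at h; simp [h, hx]
      rw [if_neg (by simp), show fs ++ x :: ts = (fs ++ [x]) ++ ts by simp,
        ih (fs ++ [x]) ts hf' ht]
      simp [hx]

-- Stable sort on a boolean key is exactly "false-keyed elements first, then true-keyed".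
theorem pv_sorted_bool_eq_partition {α : Type} (p : α → Bool) (xs : List α) :
    PySem.List.sorted xs p false = xs.filter (fun c => !p c) ++ xs.filter p := by
  rw [PySem.List.sorted_eq_foldl_insertBy]
  simpa using pv_foldl_insertBy_bool p xs [] [] (by simp) (by simp)

-- ===== VERDICT (by name: the statement is the Claim_ definition above) =====
theorem generate_sku_code_from_name_spec : Claim_equal_generate_sku_code_from_name := by
  intro name length _
  unfold Spec_generate_sku_code_from_name generate_sku_code_from_name generate_sku_code_from_name_alt
  by_cases h : name = ""
  · simp [h]
  · simp only [h, if_false]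
    rw [pv_sorted_bool_eq_partition, List.filter_filter, List.filter_filter]
    simp only [Bool.and_comm]
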